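-- pv_equiv track=rewrite | github.com/G4brielV/PSI2_e_FPC | Conjunto_de_Problemas/Pt5/2 Drone.py | drone
-- ===== SOURCE A (Python) =====
-- def drone(a,b,c,h,l):
--     caixa = [a,b,c]
--     janela = []
--     # Ordaenando as dimensões da janela
--     if h < l:
--         janela = [h,l]
--     else:
--         janela = [l,h]
--
--     # Ordenando as dimensões da caixa
--     for i in range(len(caixa)-1):
--         if caixa[i] <= caixa[i+1]:
--             pass
--
--         else:
--             cont = 0
--             while i-cont >= 0 and caixa[i+1-cont] < caixa[i-cont]:
--                 caixa[i-cont], caixa[i+1-cont] = caixa[i+1-cont], caixa[i-cont]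
--                 cont += 1
--
--     if janela[0] >= caixa[0] and janela[1] >= caixa[1]:
--         return "S"
--
--     else:
--         return "N"
-- ===== SOURCE B (Python) =====
-- def drone(a, b, c, h, l):
--     wmin, wmax = (h, l) if h < l else (l, h)
--     bmin = min(a, b, c)
--     bmid = max(min(a, b), min(b, c), min(a, c))
--     return "S" if wmin >= bmin and wmax >= bmid else "N"
-- ===== Notes on version B (the rewrite author's own statement) =====
-- stated objective: simpler
-- what changed: Replaces the hand-written insertion sort of the box dimensions (and window-pair ordering via lists) with direct min/median-of-three comparisons, so no list is built or sorted.
import Mathlib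
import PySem

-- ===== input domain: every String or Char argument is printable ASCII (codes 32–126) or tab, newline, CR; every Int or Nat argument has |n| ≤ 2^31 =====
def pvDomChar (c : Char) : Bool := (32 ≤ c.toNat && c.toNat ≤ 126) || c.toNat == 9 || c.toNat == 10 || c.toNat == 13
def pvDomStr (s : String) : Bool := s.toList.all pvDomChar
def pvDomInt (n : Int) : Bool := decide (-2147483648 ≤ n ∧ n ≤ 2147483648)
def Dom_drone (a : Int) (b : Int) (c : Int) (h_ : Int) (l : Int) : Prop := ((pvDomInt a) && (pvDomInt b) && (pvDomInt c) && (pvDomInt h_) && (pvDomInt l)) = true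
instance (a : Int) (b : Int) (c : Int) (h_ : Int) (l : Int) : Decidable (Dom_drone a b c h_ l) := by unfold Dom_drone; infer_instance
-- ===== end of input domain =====

-- B replaces A's hand-written insertion sort of the box dimensions (and the window
-- pair kept as a sorted list) with direct min / median-of-three comparisons: simpler.

-- ===== PORT A =====
-- Python's inner `while i-cont >= 0 and caixa[i+1-cont] < caixa[i-cont]: swap; cont += 1`
def droneWhile (caixa : List Int) (i : Int) (cont : Int) : List Int :=
  if _hcond : 0 ≤ i - cont then
    match PySem.List.pyGet? caixa (i + 1 - cont), PySem.List.pyGet? caixa (i - cont) with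
    | some x, some y =>
        if x < y then
          droneWhile ((caixa.set (i - cont).toNat x).set (i + 1 - cont).toNat y) i (cont + 1)
        else caixa
    | _, _ => caixa
  else caixa
termination_by (i - cont + 1).toNat
decreasing_by omega

def drone (a : Int) (b : Int) (c : Int) (h_ : Int) (l : Int) : String :=
  let caixa : List Int := [a, b, c]
  let janela : List Int := if h_ < l then [h_, l] else [l, h_]
  -- for i in range(len(caixa)-1): if caixa[i] <= caixa[i+1]: pass else: <while loop>
  let caixa := (PySem.List.pyRange 0 ((caixa.length : Int) - 1) 1).foldl
    (fun cx i =>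
      match PySem.List.pyGet? cx i, PySem.List.pyGet? cx (i + 1) with
      | some x, some y => if x ≤ y then cx else droneWhile cx i 0
      | _, _ => cx) caixa
  match PySem.List.pyGet? janela 0, PySem.List.pyGet? caixa 0, PySem.List.pyGet? janela 1, PySem.List.pyGet? caixa 1 with
  | some j0, some c0, some j1, some c1 => if j0 ≥ c0 ∧ j1 ≥ c1 then "S" else "N"
  | _, _, _, _ => "N"  -- unreachable: both lists always have the needed length

-- ===== PORT B =====
def drone_alt (a : Int) (b : Int) (c : Int) (h_ : Int) (l : Int) : String :=
  let wmin := if h_ < l then h_ else l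
  let wmax := if h_ < l then l else h_
  let bmin := min a (min b c)
  let bmid := max (min a b) (max (min b c) (min a c))
  if wmin ≥ bmin ∧ wmax ≥ bmid then "S" else "N"

-- ===== PRECONDITION & SPEC =====
def Spec_drone (a : Int) (b : Int) (c : Int) (h_ : Int) (l : Int) (out : String) : Prop := out = drone_alt a b c h_ l
instance (a : Int) (b : Int) (c : Int) (h_ : Int) (l : Int) (out : String) : Decidable (Spec_drone a b c h_ l out) := by unfold Spec_drone; infer_instance

-- ===== CLAIM (what is proved, stated in full; the proofs are below) =====
def Claim_equal_drone : Prop := ∀ (a : Int) (b : Int) (c : Int) (h_ : Int) (l : Int), Dom_drone a b c h_ l → Spec_drone a b c h_ l (drone a b c h_ l)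

-- ===== LEMMAS AND PROOFS =====
lemma dw0 (x y z : Int) (h : y < x) : droneWhile [x, y, z] 0 0 = [y, x, z] := by
  rw [droneWhile]
  norm_num [PySem.List.pyGet?, PySem.List.pyIdx?, h]
  rw [droneWhile]
  norm_num

lemma dw1a (x y z : Int) (h : z < y) (h2 : x ≤ z) : droneWhile [x, y, z] 1 0 = [x, z, y] := by
  rw [droneWhile]
  norm_num [PySem.List.pyGet?, PySem.List.pyIdx?, show Int.toNat 2 = 2 from rfl, List.set, h]
  rw [droneWhile]
  norm_num [PySem.List.pyGet?, PySem.List.pyIdx?, show Int.toNat 2 = 2 from rfl, List.set, not_lt.2 h2]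

lemma dw1b (x y z : Int) (h : z < y) (h2 : z < x) : droneWhile [x, y, z] 1 0 = [z, x, y] := by
  rw [droneWhile]
  norm_num [PySem.List.pyGet?, PySem.List.pyIdx?, show Int.toNat 2 = 2 from rfl, List.set, h]
  rw [droneWhile]
  norm_num [PySem.List.pyGet?, PySem.List.pyIdx?, show Int.toNat 2 = 2 from rfl, List.set, h2]
  rw [droneWhile]
  norm_num

lemma range2 : PySem.List.pyRange 0 2 1 = [0, 1] := by decide

-- the sorted triple A's insertion sort produces, by cases on the comparisons
lemma drone_sorted (a b c : Int) :
    (PySem.List.pyRange 0 2 1).foldl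
      (fun cx i =>
        match PySem.List.pyGet? cx i, PySem.List.pyGet? cx (i + 1) with
        | some x, some y => if x ≤ y then cx else droneWhile cx i 0
        | _, _ => cx) [a, b, c]
    = [min a (min b c), max (min a b) (max (min b c) (min a c)), max a (max b c)] := by
  rw [range2]
  by_cases hab : a ≤ b
  · by_cases hbc : b ≤ c
    · norm_num [List.foldl, PySem.List.pyGet?, PySem.List.pyIdx?, show Int.toNat 2 = 2 from rfl, hab, hbc, List.cons.injEq]
      omega
    · by_cases hac : a ≤ c
      · norm_num [List.foldl, PySem.List.pyGet?, PySem.List.pyIdx?, show Int.toNat 2 = 2 from rfl, hab, hbc,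
          dw1a a b c (by omega) hac, List.cons.injEq]
        omega
      · norm_num [List.foldl, PySem.List.pyGet?, PySem.List.pyIdx?, show Int.toNat 2 = 2 from rfl, hab, hbc,
          dw1b a b c (by omega) (by omega), List.cons.injEq]
        omega
  · by_cases hbc : b ≤ c
    · by_cases hac : a ≤ c
      · norm_num [List.foldl, PySem.List.pyGet?, PySem.List.pyIdx?, show Int.toNat 2 = 2 from rfl, hab, hac,
          dw0 a b c (by omega), List.cons.injEq]
        omega
      · norm_num [List.foldl, PySem.List.pyGet?, PySem.List.pyIdx?, show Int.toNat 2 = 2 from rfl, hab, hac,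
          dw0 a b c (by omega), dw1a b a c (by omega) hbc, List.cons.injEq]
        omega
    · norm_num [List.foldl, PySem.List.pyGet?, PySem.List.pyIdx?, show Int.toNat 2 = 2 from rfl, hab,
        show ¬ a ≤ c by omega, dw0 a b c (by omega),
        dw1b b a c (by omega) (by omega), List.cons.injEq]
      omega

-- ===== VERDICT (by name: the statement is the Claim_ definition above) =====
theorem drone_spec : Claim_equal_drone := by
  intro a b c h_ l _
  unfold Spec_drone drone drone_alt
  simp only [List.length_cons, List.length_nil]
  norm_num
  rw [drone_sorted a b c]
  by_cases hhl : h_ < l <;>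
    simp only [if_pos, hhl, PySem.List.pyGet?, PySem.List.pyIdx?] <;> norm_num
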